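-- pv_equiv track=rewrite | github.com/bakhe8/BGL3 | .bgl_core/brain/code_contracts.py | _extract_comment_tags
-- ===== SOURCE A (Python) =====
-- from typing import Any, Dict, List, Optional, Set, Tuple
--
-- def _extract_comment_tags(hints: List[str]) -> List[str]:
--     if not hints:
--         return []
--     tags: Set[str] = set()
--     for h in hints:
--         t = str(h or "").lower()
--         for key in ("todo", "fixme", "bug", "hack", "note", "xxx", "workaround", "temporary", "temp"):
--             if key in t:
--                 tags.add(key)
--     return sorted(tags)
-- ===== SOURCE B (Python) =====
-- def _extract_comment_tags(hints):
--     text = "\n".join(str(h or "") for h in hints).lower()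
--     return [key for key in ("bug", "fixme", "hack", "note", "temp",
--                             "temporary", "todo", "workaround", "xxx")
--             if key in text]
-- ===== Notes on version B (the rewrite author's own statement) =====
-- stated objective: simpler
-- what changed: B joins all hints into one newline-separated text, lowercases it once, and keeps the keywords (listed pre-sorted) that occur in that single text, so A's per-hint nested keyword loop, mutable set and final sort all disappear; the newline separator occurs in no keyword, so no spurious cross-hint match can arise.
import Mathlib
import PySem

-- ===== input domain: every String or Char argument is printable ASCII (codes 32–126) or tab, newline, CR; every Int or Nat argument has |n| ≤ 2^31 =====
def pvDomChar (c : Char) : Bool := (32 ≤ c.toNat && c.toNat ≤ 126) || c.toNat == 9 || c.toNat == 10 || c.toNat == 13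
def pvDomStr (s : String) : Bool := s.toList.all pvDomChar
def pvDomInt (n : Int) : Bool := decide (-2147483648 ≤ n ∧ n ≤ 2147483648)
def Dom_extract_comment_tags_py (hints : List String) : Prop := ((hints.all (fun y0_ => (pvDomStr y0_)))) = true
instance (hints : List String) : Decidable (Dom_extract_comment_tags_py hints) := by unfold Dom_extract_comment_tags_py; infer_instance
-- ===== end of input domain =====

-- B joins all hints into one newline-lowered text and filters the pre-sorted keyword list
-- against it, replacing A's mutable set + nested per-hint keyword loop + final sort (objective: simpler).


-- ===== PORT A =====
-- the keyword tuple, in A's source order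
def pvKeysA : List String := ["todo", "fixme", "bug", "hack", "note", "xxx", "workaround", "temporary", "temp"]

def extract_comment_tags_py (hints : List String) : List String :=
  if hints = [] then []
  else
    let tags : PySem.Set String :=
      hints.foldl (fun tags h =>
        let t := PySem.Str.lower (if h == "" then "" else h)   -- str(h or "").lower(); str() is identity on str
        pvKeysA.foldl (fun tags key =>
          if PySem.Str.isIn key t then PySem.Set.add tags key else tags) tags)
        PySem.Set.empty
    PySem.List.sorted tags (fun x => x) false

-- ===== PORT B =====
-- the keyword tuple, already in sorted order
def pvKeysB : List String := ["bug", "fixme", "hack", "note", "temp", "temporary", "todo", "workaround", "xxx"]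

def extract_comment_tags_py_alt (hints : List String) : List String :=
  let text := PySem.Str.lower (PySem.Str.join "\n" (hints.map (fun h => if h == "" then "" else h)))
  pvKeysB.filter (fun key => PySem.Str.isIn key text)

-- ===== PRECONDITION & SPEC =====
def Spec_extract_comment_tags_py (hints : List String) (out : List String) : Prop := out = extract_comment_tags_py_alt hints
instance (hints : List String) (out : List String) : Decidable (Spec_extract_comment_tags_py hints out) := by unfold Spec_extract_comment_tags_py; infer_instance

-- ===== CLAIM (what is proved, stated in full; the proofs are below) =====
def Claim_equal_extract_comment_tags_py : Prop := ∀ (hints : List String), Dom_extract_comment_tags_py hints → Spec_extract_comment_tags_py hints (extract_comment_tags_py hints)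

-- ===== LEMMAS AND PROOFS =====

-- 'h or ""' is the identity on strings
theorem pv_or_empty (h : String) : (if h == "" then "" else h) = h := by
  split
  · next hh => simp only [beq_iff_eq] at hh; exact hh.symm
  · rfl

-- membership after the inner keyword loop of A
theorem pv_mem_inner (ks : List String) (acc : List String) (t : String) (x : String) :
    x ∈ ks.foldl (fun tags key =>
        if PySem.Str.isIn key t then PySem.Set.add tags key else tags) acc ↔
      x ∈ acc ∨ (x ∈ ks ∧ PySem.Str.isIn x t = true) := by
  induction ks generalizing acc with
  | nil => simp
  | cons k ks ih =>
    rw [List.foldl_cons, ih]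
    by_cases hk : PySem.Str.isIn k t = true
    · simp only [hk, if_pos, PySem.Set.mem_add, List.mem_cons]
      by_cases hx : x = k
      · subst hx; simp only [PySem.Str.isIn_eq] at hk; simp [hk]
      · simp [hx]
    · simp only [hk, if_neg, List.mem_cons, Bool.not_eq_true]
      constructor
      · rintro (h | ⟨hm, ht⟩)
        · exact Or.inl h
        · exact Or.inr ⟨Or.inr hm, ht⟩
      · rintro (h | ⟨hm | hm, ht⟩)
        · exact Or.inl h
        · subst hm; exact absurd ht hk
        · exact Or.inr ⟨hm, ht⟩

-- nodup is preserved by the inner keyword loop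
theorem pv_nodup_inner (ks : List String) (acc : List String) (t : String) (hn : acc.Nodup) :
    (ks.foldl (fun tags key =>
        if PySem.Str.isIn key t then PySem.Set.add tags key else tags) acc).Nodup := by
  induction ks generalizing acc with
  | nil => exact hn
  | cons k ks ih =>
    rw [List.foldl_cons]
    apply ih
    split
    · exact PySem.Set.nodup_add acc k hn
    · exact hn

-- membership after A's outer loop over the hints
theorem pv_mem_outer (hs : List String) (acc : List String) (x : String) :
    x ∈ hs.foldl (fun tags h =>
        let t := PySem.Str.lower (if h == "" then "" else h)
        pvKeysA.foldl (fun tags key =>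
          if PySem.Str.isIn key t then PySem.Set.add tags key else tags) tags) acc ↔
      x ∈ acc ∨ (x ∈ pvKeysA ∧
        hs.any (fun h => PySem.Str.isIn x (PySem.Str.lower h)) = true) := by
  induction hs generalizing acc with
  | nil => simp
  | cons h hs ih =>
    rw [List.foldl_cons, ih]
    simp only [pv_or_empty, pv_mem_inner, List.any_cons, Bool.or_eq_true]
    tauto

-- nodup after A's outer loop
theorem pv_nodup_outer (hs : List String) (acc : List String) (hn : acc.Nodup) :
    (hs.foldl (fun tags h =>
        let t := PySem.Str.lower (if h == "" then "" else h)
        pvKeysA.foldl (fun tags key =>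
          if PySem.Str.isIn key t then PySem.Set.add tags key else tags) tags) acc).Nodup := by
  induction hs generalizing acc with
  | nil => exact hn
  | cons h hs ih => exact ih _ (pv_nodup_inner _ _ _ hn)

theorem pv_keysB_pairwise : pvKeysB.Pairwise (fun a b => a < b) := by
  have h : (pvKeysB.map String.toList).Pairwise (fun a b => a < b) := by decide
  rw [List.pairwise_map] at h
  exact h.imp (fun hab => String.lt_iff_toList_lt.mpr hab)

theorem pv_keysB_nodup : pvKeysB.Nodup := by decide

theorem pv_mem_keys (x : String) : x ∈ pvKeysA ↔ x ∈ pvKeysB := by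
  simp only [pvKeysA, pvKeysB, List.mem_cons, List.not_mem_nil]
  tauto

-- an occurrence of sub in xs ++ c :: ys with c ∉ sub lies wholly inside xs or wholly inside ys
theorem pv_infix_mid {α : Type} (sub xs ys : List α) (c : α) (hc : c ∉ sub)
    (h : sub <:+: xs ++ c :: ys) : sub <:+: xs ∨ sub <:+: ys := by
  obtain ⟨s, t, hst⟩ := h
  by_cases hsx : s.length ≤ xs.length
  · -- the occurrence starts inside xs
    have hdrop : sub ++ t = xs.drop s.length ++ c :: ys := by
      have := congrArg (List.drop s.length) hst
      simpa [List.drop_append_of_le_length hsx] using this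
    have htake : sub = (xs.drop s.length).take sub.length ++
        (c :: ys).take (sub.length - (xs.drop s.length).length) := by
      have := congrArg (List.take sub.length) hdrop
      simpa [List.take_append] using this
    by_cases hle : s.length + sub.length ≤ xs.length
    · left
      have hz : sub.length - (xs.drop s.length).length = 0 := by simp; omega
      rw [hz, List.take_zero, List.append_nil] at htake
      have h1 : sub <+: xs.drop s.length := htake ▸ List.take_prefix _ _
      exact h1.isInfix.trans (List.drop_suffix _ _).isInfix
    · -- the occurrence would have to contain c
      exfalso
      have hz : sub.length - (xs.drop s.length).length ≠ 0 := by simp; omega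
      apply hc
      rw [htake]
      rcases Nat.exists_eq_succ_of_ne_zero hz with ⟨k, hk⟩
      rw [hk]
      simp
  · right
    have h1 : xs.drop s.length = [] := by simp; omega
    have h2 : (c :: ys).drop (s.length - xs.length) = ys.drop (s.length - xs.length - 1) := by
      have h3 : s.length - xs.length = (s.length - xs.length - 1) + 1 := by omega
      rw [h3]; simp
    have heq := congrArg (List.drop s.length) hst
    rw [List.append_assoc, List.drop_left, List.drop_append, h1, h2, List.nil_append] at heq
    have htp : sub <+: ys.drop (s.length - xs.length - 1) := ⟨t, heq⟩
    exact htp.isInfix.trans (List.drop_suffix _ _).isInfix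

-- a nonempty sub without the separator char is in the joined text iff it is in some part
theorem pv_infix_join (sub : List Char) (c : Char) (hc : c ∉ sub) (hne : sub ≠ []) :
    ∀ l : List (List Char), (sub <:+: PySem.Chars.join [c] l ↔ ∃ p ∈ l, sub <:+: p) := by
  intro l
  induction l with
  | nil => simp [PySem.Chars.join_nil, List.infix_nil, hne]
  | cons p l ih =>
    cases l with
    | nil => simp [PySem.Chars.join_singleton]
    | cons q rest =>
      rw [PySem.Chars.join_cons_cons]
      constructor
      · intro h
        have h' : sub <:+: p ++ c :: PySem.Chars.join [c] (q :: rest) := by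
          simpa [List.append_assoc] using h
        rcases pv_infix_mid sub p _ c hc h' with h1 | h1
        · exact ⟨p, by simp, h1⟩
        · rcases ih.mp h1 with ⟨r, hr, hsr⟩
          exact ⟨r, by simp [hr], hsr⟩
      · rintro ⟨r, hr, hsr⟩
        rcases List.mem_cons.mp hr with rfl | hr'
        · rw [List.append_assoc]
          exact hsr.trans (List.prefix_append _ _).isInfix
        · exact (ih.mpr ⟨r, hr', hsr⟩).trans (List.suffix_append _ _).isInfix

-- lower() distributes over the newline join (the separator lowers to itself)
theorem pv_lower_join (c : Char) (l : List (List Char)) :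
    PySem.Chars.lower (PySem.Chars.join [c] l) =
      PySem.Chars.join [PySem.Chars.lowerChar c] (l.map PySem.Chars.lower) := by
  induction l with
  | nil => simp [PySem.Chars.join_nil, PySem.Chars.lower]
  | cons p l ih =>
    cases l with
    | nil => simp [PySem.Chars.join_singleton]
    | cons q rest =>
      simp only [List.map_cons] at ih ⊢
      rw [PySem.Chars.join_cons_cons, PySem.Chars.join_cons_cons]
      simpa [PySem.Chars.lower] using ih

-- a keyword (nonempty, newline-free) is in B's joined lowered text iff it is in some lowered hint
theorem pv_isIn_text (hints : List String) (key : String)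
    (h1 : key.toList ≠ []) (h2 : '\n' ∉ key.toList) :
    PySem.Str.isIn key
        (PySem.Str.lower (PySem.Str.join "\n" (hints.map (fun h => if h == "" then "" else h))))
      = hints.any (fun h => PySem.Str.isIn key (PySem.Str.lower h)) := by
  have hmap : hints.map (fun h => if h == "" then "" else h) = hints := by
    conv_lhs => rw [show (fun h : String => if h == "" then "" else h) = id from funext pv_or_empty]
    exact List.map_id _
  rw [hmap, Bool.eq_iff_iff, PySem.Str.isIn_iff_infix, List.any_eq_true,
    PySem.Str.toList_lower, PySem.Str.toList_join]
  have hnl : ("\n" : String).toList = ['\n'] := by decide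
  have hlc : PySem.Chars.lowerChar '\n' = '\n' := by decide
  rw [hnl, pv_lower_join, hlc, pv_infix_join key.toList '\n' h2 h1]
  constructor
  · rintro ⟨p, hp, hsp⟩
    rw [List.mem_map] at hp
    obtain ⟨h, hh, rfl⟩ := hp
    rw [List.mem_map] at hh
    obtain ⟨g, hg, rfl⟩ := hh
    exact ⟨g, hg, (PySem.Str.isIn_iff_infix _ _).mpr (by rw [PySem.Str.toList_lower]; exact hsp)⟩
  · rintro ⟨h, hh, hsp⟩
    refine ⟨PySem.Chars.lower h.toList,
      List.mem_map.mpr ⟨h.toList, List.mem_map.mpr ⟨h, hh, rfl⟩, rfl⟩, ?_⟩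
    have := (PySem.Str.isIn_iff_infix _ _).mp hsp
    rwa [PySem.Str.toList_lower] at this

theorem pv_keys_ok : ∀ k ∈ pvKeysB, k.toList ≠ [] ∧ '\n' ∉ k.toList := by decide

-- ===== VERDICT (by name: the statement is the Claim_ definition above) =====
theorem extract_comment_tags_py_spec : Claim_equal_extract_comment_tags_py := by
  intro hints _
  unfold Spec_extract_comment_tags_py
  have hB : extract_comment_tags_py_alt hints =
      pvKeysB.filter (fun key => hints.any (fun h => PySem.Str.isIn key (PySem.Str.lower h))) := by
    unfold extract_comment_tags_py_alt
    exact List.filter_congr (fun k hk => pv_isIn_text hints k (pv_keys_ok k hk).1 (pv_keys_ok k hk).2)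
  rw [hB]
  unfold extract_comment_tags_py
  by_cases hnil : hints = []
  · subst hnil; simp
  · simp only [hnil]
    apply PySem.List.sorted_eq_of_perm_of_pairwise_lt
    · rw [List.perm_ext_iff_of_nodup
        (List.Nodup.filter _ pv_keysB_nodup)
        (pv_nodup_outer hints PySem.Set.empty List.nodup_nil)]
      intro x
      rw [List.mem_filter, pv_mem_outer]
      simp only [PySem.Set.empty, List.not_mem_nil, false_or, pv_mem_keys]
    · exact List.Pairwise.filter _ pv_keysB_pairwise
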